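-- pv_equiv track=rewrite | github.com/ytsaurus/ytsaurus | yt/yt/tests/integration/scheduler_simulator/test_scheduler_simulator.py | resources_equal
-- ===== SOURCE A (Python) =====
-- from collections import defaultdict
--
-- def resources_equal(lhs, rhs):
--     lhs = defaultdict(int, lhs)
--     rhs = defaultdict(int, rhs)
--     if "user_memory" in lhs:
--         lhs["memory"] = lhs["user_memory"]
--         del lhs["user_memory"]
--     if "user_memory" in rhs:
--         rhs["memory"] = rhs["user_memory"]
--         del rhs["user_memory"]
--
--     return all(
--         lhs[resource] == rhs[resource] for resource in {resource for resource in lhs} | {resource for resource in rhs}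
--     )
-- ===== SOURCE B (Python) =====
-- def resources_equal(lhs, rhs):
--     def normalize(d):
--         r = dict(d)
--         if "user_memory" in r:
--             r["memory"] = r.pop("user_memory")
--         return {k: v for k, v in r.items() if v != 0}
--     return normalize(lhs) == normalize(rhs)
-- ===== Notes on version B (the rewrite author's own statement) =====
-- stated objective: simpler
-- what changed: B canonicalizes each dict once (rename user_memory to memory via pop, drop zero-valued entries) and compares the two canonical dicts with a plain ==, instead of A's comparison of every key in the union of the two key sets under defaultdict(int) lookups.
import Mathlib
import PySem

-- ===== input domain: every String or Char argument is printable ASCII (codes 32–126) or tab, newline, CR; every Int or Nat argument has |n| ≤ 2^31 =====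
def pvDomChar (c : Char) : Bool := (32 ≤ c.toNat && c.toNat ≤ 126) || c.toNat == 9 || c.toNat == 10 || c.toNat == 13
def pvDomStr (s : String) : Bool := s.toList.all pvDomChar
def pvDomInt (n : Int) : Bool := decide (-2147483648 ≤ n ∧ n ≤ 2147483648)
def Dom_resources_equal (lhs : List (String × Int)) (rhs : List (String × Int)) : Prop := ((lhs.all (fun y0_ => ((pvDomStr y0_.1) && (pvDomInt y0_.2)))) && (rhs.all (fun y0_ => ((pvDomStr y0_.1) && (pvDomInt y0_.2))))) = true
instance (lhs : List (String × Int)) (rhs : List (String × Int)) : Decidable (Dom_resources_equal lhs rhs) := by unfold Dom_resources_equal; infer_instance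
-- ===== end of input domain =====

-- B replaces A's key-union/all comparison by "canonicalize both dicts (fold user_memory into memory, drop zero entries), then compare as dicts" — objective: simpler.


-- ===== PORT A =====
def resources_equal (lhs : List (String × Int)) (rhs : List (String × Int)) : Bool :=
  let l0 := PySem.Dict.ofList lhs
  let r0 := PySem.Dict.ofList rhs
  let l := if l0.contains "user_memory" then
      (l0.insert "memory" (l0.getD "user_memory" 0)).erase "user_memory" else l0
  let r := if r0.contains "user_memory" then
      (r0.insert "memory" (r0.getD "user_memory" 0)).erase "user_memory" else r0
  let keys := PySem.Set.union (PySem.Set.ofList l.keys) (PySem.Set.ofList r.keys)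
  keys.all (fun k => l.getD k 0 == r.getD k 0)

-- ===== PORT B =====
-- normalize(d): dict(d); fold user_memory into memory via pop; keep only nonzero entries
def pvNormalize (d : List (String × Int)) : PySem.Dict String Int :=
  let r0 := PySem.Dict.ofList d
  let r := match r0.pop? "user_memory" with
    | some (v, r') => r'.insert "memory" v
    | none => r0
  PySem.Dict.mk (r.items.filter (fun p => p.2 != 0))

-- Python's dict == ignores insertion order: with unique keys it is equality of the item SETS
def resources_equal_alt (lhs : List (String × Int)) (rhs : List (String × Int)) : Bool :=
  PySem.Set.equal (pvNormalize lhs).items (pvNormalize rhs).items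

-- ===== PRECONDITION & SPEC =====
def Spec_resources_equal (lhs : List (String × Int)) (rhs : List (String × Int)) (out : Bool) : Prop := out = resources_equal_alt lhs rhs
instance (lhs : List (String × Int)) (rhs : List (String × Int)) (out : Bool) : Decidable (Spec_resources_equal lhs rhs out) := by unfold Spec_resources_equal; infer_instance

-- ===== CLAIM (what is proved, stated in full; the proofs are below) =====
def Claim_equal_resources_equal : Prop := ∀ (lhs : List (String × Int)) (rhs : List (String × Int)), Dom_resources_equal lhs rhs → Spec_resources_equal lhs rhs (resources_equal lhs rhs)

-- ===== LEMMAS AND PROOFS =====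

-- proof-only abbreviations for the two canonicalization phases
def pvTA (d : List (String × Int)) : PySem.Dict String Int :=
  if (PySem.Dict.ofList d).contains "user_memory" then
    ((PySem.Dict.ofList d).insert "memory" ((PySem.Dict.ofList d).getD "user_memory" 0)).erase "user_memory"
  else PySem.Dict.ofList d

def pvTB (d : List (String × Int)) : PySem.Dict String Int :=
  match (PySem.Dict.ofList d).pop? "user_memory" with
  | some (v, r') => r'.insert "memory" v
  | none => PySem.Dict.ofList d

theorem pv_find?_filter (l : List (String × Int)) (k k' : String) :
    (l.filter (fun p => !(p.1 == k))).find? (fun p => p.1 == k')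
      = if k' = k then none else l.find? (fun p => p.1 == k') := by
  induction l with
  | nil => simp
  | cons a t ih =>
    by_cases hak : a.1 = k
    · by_cases hkk : k' = k <;> simp [hak, ih, hkk, Ne.symm]
    · by_cases hak' : a.1 = k'
      · by_cases hkk : k' = k
        · exact absurd hak' (by rw [hkk]; exact hak)
        · simp [hak', hkk]
      · simp [hak, hak', ih]

theorem pv_get?_erase (d : PySem.Dict String Int) (k k' : String) :
    (d.erase k).get? k' = if k' = k then none else d.get? k' := by
  simp only [PySem.Dict.erase, PySem.Dict.get?, pv_find?_filter]
  split <;> rfl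

theorem pv_nodup_keys_erase (d : PySem.Dict String Int) (k : String) (h : d.keys.Nodup) :
    (d.erase k).keys.Nodup := by
  have hsub : (d.erase k).keys.Sublist d.keys := by
    simpa [PySem.Dict.erase, PySem.Dict.keys] using
      (List.filter_sublist (l := d.items) (p := fun p => !(p.1 == k))).map Prod.fst
  exact h.sublist hsub

-- the two orders of (insert memory, pop user_memory) agree on every lookup
theorem pv_transform_get? (d : PySem.Dict String Int) (v : Int) (k : String) :
    ((d.insert "memory" v).erase "user_memory").get? k
      = ((d.erase "user_memory").insert "memory" v).get? k := by
  rw [pv_get?_erase, PySem.Dict.get?_insert, PySem.Dict.get?_insert, pv_get?_erase]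
  by_cases h1 : k = "user_memory" <;> by_cases h2 : k = "memory" <;> simp [h1, h2] at *

theorem pv_TA_TB_get? (d : List (String × Int)) (k : String) :
    (pvTA d).get? k = (pvTB d).get? k := by
  unfold pvTA pvTB
  rcases h : (PySem.Dict.ofList d).get? "user_memory" with _ | v
  · have hc : (PySem.Dict.ofList d).contains "user_memory" = false := by
      rw [PySem.Dict.contains_eq_isSome_get?, h]; rfl
    simp [PySem.Dict.pop?, h, hc]
  · have hc : (PySem.Dict.ofList d).contains "user_memory" = true := by
      rw [PySem.Dict.contains_eq_isSome_get?, h]; rfl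
    simp only [PySem.Dict.pop?, h, Option.map_some, hc, if_true]
    rw [PySem.Dict.getD_of_get?_eq_some _ _ h]
    exact pv_transform_get? _ v k

theorem pv_TB_nodup (d : List (String × Int)) : (pvTB d).keys.Nodup := by
  unfold pvTB
  rcases h : (PySem.Dict.ofList d).pop? "user_memory" with _ | p
  · exact PySem.Dict.nodup_keys_ofList d
  · rcases p with ⟨v, r'⟩
    have hr' : r' = (PySem.Dict.ofList d).erase "user_memory" := by
      simp only [PySem.Dict.pop?] at h
      rcases hg : (PySem.Dict.ofList d).get? "user_memory" with _ | w <;> rw [hg] at h <;>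
        simp at h
      exact h.2.symm
    subst hr'
    exact PySem.Dict.nodup_keys_insert _ _ _
      (pv_nodup_keys_erase _ _ (PySem.Dict.nodup_keys_ofList d))

-- A's all-over-key-union test says: every key reads equal under default 0
theorem pv_all_union_iff (L R : PySem.Dict String Int) :
    ((PySem.Set.union (PySem.Set.ofList L.keys) (PySem.Set.ofList R.keys)).all
        (fun k => L.getD k 0 == R.getD k 0) = true)
      ↔ ∀ k, L.getD k 0 = R.getD k 0 := by
  rw [List.all_eq_true]
  constructor
  · intro h k
    by_cases hk : k ∈ PySem.Set.union (PySem.Set.ofList L.keys) (PySem.Set.ofList R.keys)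
    · exact beq_iff_eq.mp (h k hk)
    · rw [PySem.Set.mem_union, PySem.Set.mem_ofList, PySem.Set.mem_ofList] at hk
      rw [not_or] at hk
      rw [PySem.Dict.getD_eq_get?_getD, PySem.Dict.getD_eq_get?_getD,
        (PySem.Dict.get?_eq_none_iff_not_mem_keys _ _).mpr hk.1,
        (PySem.Dict.get?_eq_none_iff_not_mem_keys _ _).mpr hk.2]
  · intro h k _
    exact beq_iff_eq.mpr (h k)

-- membership in a zero-stripped dict characterizes nonzero lookups
theorem pv_mem_filter_iff (L : PySem.Dict String Int) (hL : L.keys.Nodup) (k : String) (v : Int) :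
    ((k, v) ∈ L.items.filter (fun p => p.2 != 0)) ↔ (L.get? k = some v ∧ v ≠ 0) := by
  rw [List.mem_filter]
  simp only [bne_iff_ne, ne_eq]
  rw [PySem.Dict.get?_eq_some_iff_mem_items L k v hL]

-- B's set-equality of stripped items says the same thing
theorem pv_equal_iff (L R : PySem.Dict String Int) (hL : L.keys.Nodup) (hR : R.keys.Nodup) :
    (PySem.Set.equal (L.items.filter (fun p => p.2 != 0)) (R.items.filter (fun p => p.2 != 0)) = true)
      ↔ ∀ k, L.getD k 0 = R.getD k 0 := by
  rw [PySem.Set.equal_iff]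
  constructor
  · intro h k
    rw [PySem.Dict.getD_eq_get?_getD, PySem.Dict.getD_eq_get?_getD]
    rcases hLk : L.get? k with _ | v <;> rcases hRk : R.get? k with _ | w
    · rfl
    · by_cases hw : w = 0
      · simp [hw]
      · have := ((h (k, w)).mpr ((pv_mem_filter_iff R hR k w).mpr ⟨hRk, hw⟩))
        rw [pv_mem_filter_iff L hL] at this
        rw [this.1] at hLk; cases hLk
    · by_cases hv : v = 0
      · simp [hv]
      · have := ((h (k, v)).mp ((pv_mem_filter_iff L hL k v).mpr ⟨hLk, hv⟩))
        rw [pv_mem_filter_iff R hR] at this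
        rw [this.1] at hRk; cases hRk
    · by_cases hv : v = 0
      · by_cases hw : w = 0
        · simp [hv, hw]
        · have := ((h (k, w)).mpr ((pv_mem_filter_iff R hR k w).mpr ⟨hRk, hw⟩))
          rw [pv_mem_filter_iff L hL] at this
          rw [this.1] at hLk
          cases hLk; exact absurd hv this.2
      · have := ((h (k, v)).mp ((pv_mem_filter_iff L hL k v).mpr ⟨hLk, hv⟩))
        rw [pv_mem_filter_iff R hR] at this
        rw [this.1] at hRk; cases hRk; rfl
  · intro h p
    rcases p with ⟨k, v⟩
    rw [pv_mem_filter_iff L hL, pv_mem_filter_iff R hR]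
    have hk := h k
    rw [PySem.Dict.getD_eq_get?_getD, PySem.Dict.getD_eq_get?_getD] at hk
    constructor
    · rintro ⟨hg, hv⟩
      rw [hg] at hk
      simp only [Option.getD_some] at hk
      rcases hRk : R.get? k with _ | w <;> rw [hRk] at hk <;>
        simp only [Option.getD_some, Option.getD_none] at hk
      · exact absurd hk hv
      · rw [hk]; exact ⟨rfl, hk ▸ hv⟩
    · rintro ⟨hg, hv⟩
      rw [hg] at hk
      simp only [Option.getD_some] at hk
      rcases hLk : L.get? k with _ | w <;> rw [hLk] at hk <;>
        simp only [Option.getD_some, Option.getD_none] at hk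
      · exact absurd hk.symm hv
      · exact ⟨by rw [hk], hv⟩

-- ===== VERDICT (by name: the statement is the Claim_ definition above) =====
theorem resources_equal_spec : Claim_equal_resources_equal := by
  intro lhs rhs _
  unfold Spec_resources_equal
  have hA : resources_equal lhs rhs
      = (PySem.Set.union (PySem.Set.ofList (pvTA lhs).keys) (PySem.Set.ofList (pvTA rhs).keys)).all
          (fun k => (pvTA lhs).getD k 0 == (pvTA rhs).getD k 0) := rfl
  have hB : resources_equal_alt lhs rhs
      = PySem.Set.equal ((pvTB lhs).items.filter (fun p => p.2 != 0))
          ((pvTB rhs).items.filter (fun p => p.2 != 0)) := rfl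
  have hgd : ∀ (d : List (String × Int)) (k : String), (pvTA d).getD k 0 = (pvTB d).getD k 0 := by
    intro d k
    rw [PySem.Dict.getD_eq_get?_getD, PySem.Dict.getD_eq_get?_getD, pv_TA_TB_get?]
  rw [Bool.eq_iff_iff, hA, hB]
  rw [pv_all_union_iff, pv_equal_iff _ _ (pv_TB_nodup lhs) (pv_TB_nodup rhs)]
  constructor
  · intro h k; rw [← hgd, ← hgd]; exact h k
  · intro h k; rw [hgd, hgd]; exact h k
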